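-- pv_equiv track=rewrite | github.com/favorxin/o2o_emotion | Paddle/load_pic_det_rec_excel.py | cluster
-- ===== SOURCE A (Python) =====
-- def gather(list):
--     thresh = 20
--     a = []
--     b = []
--     c = list[0]
--     for d in list:
--         if c + thresh > d:
--             a.append(d)
--         else:
--             b.append(a)
--             a = [d]
--         c = d
--     b.append(a)
--     return b
--
-- def cluster(data_list):
--     x_list = []
--     y_list = []
--     for data in data_list:
--         x_list.append(data[1])
--         y_list.append(data[2])
--
--     x_list = list(set(x_list))
--     x_list.sort()
--     y_list = list(set(y_list))
--     y_list.sort()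
--
--     x_list = gather(x_list)
--     y_list = gather(y_list)
--
--     return x_list, y_list
-- ===== SOURCE B (Python) =====
-- def _partition(lst):
--     thresh = 20
--     breaks = [i for i in range(1, len(lst)) if lst[i - 1] + thresh <= lst[i]]
--     bounds = [0] + breaks + [len(lst)]
--     return [lst[s:e] for s, e in zip(bounds, bounds[1:])]
--
-- def cluster(data_list):
--     x_list = sorted(set(data[1] for data in data_list))
--     y_list = sorted(set(data[2] for data in data_list))
--     return _partition(x_list), _partition(y_list)
-- ===== Notes on version B (the rewrite author's own statement) =====
-- stated objective: alternative
-- what changed: gather's incremental group-accumulation loop (running group a, previous element c, restart on gap) is replaced by a compute-cuts-then-slice decomposition: one comprehension finds the break indices where lst[i-1]+20 <= lst[i], then the list is partitioned by slicing between consecutive boundary markers; the x/y extraction loop is replaced by sorted(set(generator)).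
import Mathlib
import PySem

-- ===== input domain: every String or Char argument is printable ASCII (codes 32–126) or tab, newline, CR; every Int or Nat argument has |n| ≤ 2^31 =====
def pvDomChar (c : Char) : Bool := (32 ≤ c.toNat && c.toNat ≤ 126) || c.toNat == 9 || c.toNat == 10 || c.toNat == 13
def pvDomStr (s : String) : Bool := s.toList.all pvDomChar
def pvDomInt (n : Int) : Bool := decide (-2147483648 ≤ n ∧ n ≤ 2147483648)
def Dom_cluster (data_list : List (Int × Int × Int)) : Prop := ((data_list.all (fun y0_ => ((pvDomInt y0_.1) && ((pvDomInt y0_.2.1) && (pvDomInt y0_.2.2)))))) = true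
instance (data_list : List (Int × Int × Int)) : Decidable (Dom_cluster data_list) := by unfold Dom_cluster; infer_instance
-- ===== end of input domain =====

-- B replaces gather's incremental group-accumulation loop with a compute-break-indices-then-slice decomposition (alternative, same cost); x/y extraction becomes sorted(set(generator)).


-- ===== PORT A =====
-- gather: loop state (a = current group, b = finished groups, c = previous element).
-- On [] Python raises IndexError at list[0]; that input is excluded by Pre_cluster below.
def gatherA (lst : List Int) : List (List Int) :=
  match lst with
  | [] => []
  | c0 :: _ =>
    let s := lst.foldl
      (fun (st : List Int × List (List Int) × Int) d =>
        if st.2.2 + 20 > d then (st.1 ++ [d], st.2.1, d)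
        else ([d], st.2.1 ++ [st.1], d))
      ([], [], c0)
    s.2.1 ++ [s.1]

def cluster (data_list : List (Int × Int × Int)) : List (List Int) × List (List Int) :=
  let p := data_list.foldl
    (fun (st : List Int × List Int) data => (st.1 ++ [data.2.1], st.2 ++ [data.2.2]))
    ([], [])
  -- list(set(..)).sort(): sorted distinct values (order-independent consumption of the set)
  let x_sorted := PySem.List.sorted (PySem.Set.ofList p.1) (fun x => x) false
  let y_sorted := PySem.List.sorted (PySem.Set.ofList p.2) (fun x => x) false
  (gatherA x_sorted, gatherA y_sorted)

-- ===== PORT B =====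
def partitionB (lst : List Int) : List (List Int) :=
  let breaks := (PySem.List.pyRange 1 (lst.length : Int) 1).filter
    (fun i => decide (PySem.List.pyGetD lst (i - 1) 0 + 20 ≤ PySem.List.pyGetD lst i 0))
  let bounds := 0 :: breaks ++ [(lst.length : Int)]
  ((bounds.zip (PySem.List.slice bounds (some 1) none)).map
    (fun se => PySem.List.slice lst (some se.1) (some se.2)))

def cluster_alt (data_list : List (Int × Int × Int)) : List (List Int) × List (List Int) :=
  let x_list := PySem.List.sorted (PySem.Set.ofList (data_list.map (fun d => d.2.1))) (fun x => x) false
  let y_list := PySem.List.sorted (PySem.Set.ofList (data_list.map (fun d => d.2.2))) (fun x => x) false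
  (partitionB x_list, partitionB y_list)

-- ===== PRECONDITION & SPEC =====
-- Pre_ excludes exactly the empty list, the one input on which A's gather raises IndexError (list[0]).
def Pre_cluster (data_list : List (Int × Int × Int)) : Prop := data_list ≠ []
instance (data_list : List (Int × Int × Int)) : Decidable (Pre_cluster data_list) := by unfold Pre_cluster; infer_instance
def pvWitness_cluster : (List (Int × Int × Int)) := [(1, 2, 3)]

def Spec_cluster (data_list : List (Int × Int × Int)) (out : List (List Int) × List (List Int)) : Prop := out = cluster_alt data_list
instance (data_list : List (Int × Int × Int)) (out : List (List Int) × List (List Int)) : Decidable (Spec_cluster data_list out) := by unfold Spec_cluster; infer_instance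

-- ===== CLAIM (what is proved, stated in full; the proofs are below) =====
def Claim_equal_cluster : Prop := ∀ (data_list : List (Int × Int × Int)), Dom_cluster data_list → Pre_cluster data_list → Spec_cluster data_list (cluster data_list)

-- ===== LEMMAS AND PROOFS =====

-- canonical recursive grouping both ports are proved equal to (proof-side only)
def consHead (x : Int) : List (List Int) → List (List Int)
  | [] => [[x]]
  | g :: gs => (x :: g) :: gs

def chunks1 (x : Int) : List Int → List (List Int)
  | [] => [[x]]
  | y :: ys => if x + 20 > y then consHead x (chunks1 y ys) else [x] :: chunks1 y ys

def chunksFrom (a : List Int) (c : Int) : List Int → List (List Int)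
  | [] => [a]
  | d :: ds => if c + 20 > d then chunksFrom (a ++ [d]) d ds else a :: chunksFrom [d] d ds

-- Nat-indexed form of partitionB (proof-side only)
def natBreaks (l : List Int) : List Nat :=
  (List.range' 1 (l.length - 1)).filter (fun i => decide (l.getD (i - 1) 0 + 20 ≤ l.getD i 0))

def partN (l : List Int) : List (List Int) :=
  let bounds := 0 :: natBreaks l ++ [l.length]
  (bounds.zip bounds.tail).map (fun se => (l.drop se.1).take (se.2 - se.1))

theorem gatherA_loop (l : List Int) : ∀ (a : List Int) (b : List (List Int)) (c : Int),
    (let s := l.foldl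
      (fun (st : List Int × List (List Int) × Int) d =>
        if st.2.2 + 20 > d then (st.1 ++ [d], st.2.1, d)
        else ([d], st.2.1 ++ [st.1], d))
      (a, b, c)
     s.2.1 ++ [s.1]) = b ++ chunksFrom a c l := by
  induction l with
  | nil => intro a b c; simp [chunksFrom]
  | cons d ds ih =>
    intro a b c
    simp only [List.foldl_cons, chunksFrom]
    by_cases h : c + 20 > d
    · simp only [if_pos h]; exact ih (a ++ [d]) b d
    · simp only [if_neg h]
      rw [ih [d] (b ++ [a]) d]
      simp

theorem chunks1_ne_nil (x : Int) (l : List Int) : chunks1 x l ≠ [] := by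
  cases l with
  | nil => simp [chunks1]
  | cons y ys =>
    simp only [chunks1]
    split
    · cases h : chunks1 y ys <;> simp [consHead]
    · simp

theorem chunksFrom_eq (l : List Int) : ∀ (a : List Int) (x : Int),
    chunksFrom (a ++ [x]) x l =
      match chunks1 x l with
      | [] => [a]
      | g :: gs => (a ++ g) :: gs := by
  induction l with
  | nil => intro a x; simp [chunksFrom, chunks1]
  | cons d ds ih =>
    intro a x
    simp only [chunksFrom, chunks1]
    by_cases h : x + 20 > d
    · simp only [if_pos h]
      rw [ih (a ++ [x]) d]
      cases hc : chunks1 d ds with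
      | nil => exact absurd hc (chunks1_ne_nil d ds)
      | cons g gs => simp [consHead]
    · simp only [if_neg h]
      have h0 := ih [] d
      simp only [List.nil_append] at h0
      rw [h0]
      cases hc : chunks1 d ds with
      | nil => exact absurd hc (chunks1_ne_nil d ds)
      | cons g gs => simp

theorem gatherA_eq_chunks1 (x : Int) (xs : List Int) : gatherA (x :: xs) = chunks1 x xs := by
  have hloop := gatherA_loop xs [x] [] x
  dsimp only at hloop
  have hch := chunksFrom_eq xs [] x
  simp only [List.nil_append] at hch
  unfold gatherA
  dsimp only
  rw [List.foldl_cons]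
  rw [if_pos (show x + 20 > x by omega)]
  simp only [List.nil_append] at hloop ⊢
  rw [hloop, hch]
  cases hc : chunks1 x xs with
  | nil => exact absurd hc (chunks1_ne_nil x xs)
  | cons g gs => simp

theorem partitionB_eq_partN (l : List Int) : partitionB l = partN l := by
  unfold partitionB partN
  dsimp only
  have hR : PySem.List.pyRange 1 (l.length : Int) 1
      = (List.range' 1 (l.length - 1)).map (fun i : Nat => (i : Int)) := by
    rw [PySem.List.pyRange_one, List.range'_eq_map_range, List.map_map]
    have : ((l.length : Int) - 1).toNat = l.length - 1 := by omega
    rw [this]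
    apply List.map_congr_left
    intro k _
    simp
  rw [hR, List.filter_map]
  have hP : ((List.range' 1 (l.length - 1)).filter
        ((fun i => decide (PySem.List.pyGetD l (i - 1) 0 + 20 ≤ PySem.List.pyGetD l i 0)) ∘ (fun i : Nat => (i : Int))))
      = natBreaks l := by
    unfold natBreaks
    apply List.filter_congr
    intro i hi
    have h1 : 1 ≤ i := (List.mem_range'_1.mp hi).1
    have hcast : ((i : Int) - 1) = ((i - 1 : Nat) : Int) := by omega
    simp only [Function.comp, hcast, PySem.List.pyGetD_natCast]
  rw [hP]
  have hB : (0 : Int) :: (natBreaks l).map (fun i : Nat => (i : Int)) ++ [(l.length : Int)]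
      = ((0 :: natBreaks l ++ [l.length]).map (fun i : Nat => (i : Int))) := by
    simp
  rw [hB, PySem.List.slice_from_one, ← List.map_tail, List.zip_map, List.map_map]
  apply List.map_congr_left
  intro se _
  simp only [Function.comp, Prod.map]
  rw [PySem.List.slice_natCast]

theorem natBreaks_cons (x y : Int) (ys : List Int) :
    natBreaks (x :: y :: ys)
      = (if x + 20 ≤ y then [1] else []) ++ (natBreaks (y :: ys)).map (· + 1) := by
  unfold natBreaks
  have hlen : (x :: y :: ys).length - 1 = ys.length + 1 := by simp
  rw [hlen]
  rw [List.range'_succ]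
  have h2 : List.range' 2 ys.length = (List.range' 1 ((y :: ys).length - 1)).map (· + 1) := by
    simp only [List.range'_eq_map_range, List.map_map, List.length_cons, Nat.add_sub_cancel]
    apply List.map_congr_left; intro k _; simp; omega
  rw [List.filter_cons, h2, List.filter_map]
  have hpred : ∀ i ∈ List.range' 1 ((y :: ys).length - 1),
      ((fun i => decide ((x :: y :: ys).getD (i - 1) 0 + 20 ≤ (x :: y :: ys).getD i 0)) ∘ (· + 1)) i
        = decide ((y :: ys).getD (i - 1) 0 + 20 ≤ (y :: ys).getD i 0) := by
    intro i hi
    have h1 : 1 ≤ i := (List.mem_range'_1.mp hi).1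
    simp only [Function.comp, Nat.add_sub_cancel]
    congr 1
    have hg1 : (x :: y :: ys).getD i 0 = (y :: ys).getD (i - 1) 0 := by
      cases i with | zero => omega | succ j => simp
    have hg2 : (x :: y :: ys).getD (i + 1) 0 = (y :: ys).getD i 0 := by simp
    rw [hg1, hg2]
  rw [List.filter_congr hpred]
  by_cases hb : x + 20 ≤ y
  · rw [if_pos (by simp [hb]), if_pos hb]; rfl
  · rw [if_neg (by simp [hb]), if_neg hb]; rfl

theorem partN_eq_chunks1 (l : List Int) : ∀ (x : Int), partN (x :: l) = chunks1 x l := by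
  induction l with
  | nil =>
    intro x
    simp [partN, natBreaks, chunks1]
  | cons y ys ih =>
    intro x
    have hIH : partN (y :: ys) = chunks1 y ys := ih y
    obtain ⟨t0, t'', ht⟩ : ∃ t0 t'', natBreaks (y :: ys) ++ [(y :: ys).length] = t0 :: t'' := by
      cases h : natBreaks (y :: ys) ++ [(y :: ys).length] with
      | nil => exact absurd h (by simp)
      | cons a b => exact ⟨a, b, rfl⟩
    simp only [chunks1, ← hIH]
    unfold partN
    dsimp only
    rw [natBreaks_cons]
    have hlen : (x :: y :: ys).length = (y :: ys).length + 1 := by simp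
    have hmap : (natBreaks (y :: ys)).map (· + 1) ++ [(y :: ys).length + 1]
        = (t0 + 1) :: t''.map (· + 1) := by
      rw [show (natBreaks (y :: ys)).map (· + 1) ++ [(y :: ys).length + 1]
            = ((natBreaks (y :: ys) ++ [(y :: ys).length]).map (· + 1)) by simp, ht]
      simp
    by_cases hb : x + 20 ≤ y
    · rw [if_pos hb, if_neg (show ¬ x + 20 > y by omega)]
      simp only [hlen, List.cons_append, List.nil_append]
      simp only [hmap, ht]
      simp only [List.tail_cons, List.zip_cons_cons, List.map_cons]
      rw [show (((t0 + 1) : Nat) :: t''.map (· + 1)) = (t0 :: t'').map (· + 1) by simp,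
          List.zip_map, List.map_map]
      refine congrArg₂ List.cons (by simp) (congrArg₂ List.cons (by simp) ?_)
      apply List.map_congr_left
      intro se _
      simp [Prod.map, Nat.add_sub_add_right]
    · rw [if_neg hb, if_pos (show x + 20 > y by omega)]
      simp only [List.nil_append, List.cons_append, hlen]
      simp only [hmap, ht]
      simp only [List.tail_cons, List.zip_cons_cons, List.map_cons]
      rw [show (((t0 + 1) : Nat) :: t''.map (· + 1)) = (t0 :: t'').map (· + 1) by simp,
          List.zip_map, List.map_map]
      simp only [consHead]
      refine congrArg₂ List.cons (by simp [List.take_succ_cons]) ?_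
      apply List.map_congr_left
      intro se _
      simp [Prod.map, Nat.add_sub_add_right]

theorem foldl_pair (dl : List (Int × Int × Int)) : ∀ (xs ys : List Int),
    dl.foldl (fun (st : List Int × List Int) data => (st.1 ++ [data.2.1], st.2 ++ [data.2.2])) (xs, ys)
      = (xs ++ dl.map (fun d => d.2.1), ys ++ dl.map (fun d => d.2.2)) := by
  induction dl with
  | nil => intro xs ys; simp
  | cons d ds ih => intro xs ys; simp [ih]

theorem gatherA_eq_partitionB (l : List Int) (h : l ≠ []) : gatherA l = partitionB l := by
  cases l with
  | nil => exact absurd rfl h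
  | cons x xs => rw [gatherA_eq_chunks1, partitionB_eq_partN, partN_eq_chunks1 xs x]

theorem sorted_set_ne_nil (l : List Int) (h : l ≠ []) :
    PySem.List.sorted (PySem.Set.ofList l) (fun x => x) false ≠ [] := by
  intro hs
  obtain ⟨a, as, rfl⟩ := List.exists_cons_of_ne_nil h
  have ha : a ∈ PySem.Set.ofList (a :: as) := by
    rw [PySem.Set.mem_ofList]; exact List.mem_cons_self
  have hmem : a ∈ PySem.List.sorted (PySem.Set.ofList (a :: as)) (fun x : Int => x) false := by
    rw [PySem.List.mem_sorted]; exact ha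
  rw [hs] at hmem
  exact absurd hmem List.not_mem_nil

-- ===== VERDICT (by name: the statement is the Claim_ definition above) =====
theorem cluster_spec : Claim_equal_cluster := by
  intro data_list _ hpre
  unfold Spec_cluster cluster cluster_alt
  rw [foldl_pair]
  simp only [List.nil_append]
  have hx : data_list.map (fun d => d.2.1) ≠ [] := by
    cases data_list with | nil => exact absurd rfl hpre | cons a as => simp
  have hy : data_list.map (fun d => d.2.2) ≠ [] := by
    cases data_list with | nil => exact absurd rfl hpre | cons a as => simp
  rw [gatherA_eq_partitionB _ (sorted_set_ne_nil _ hx),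
      gatherA_eq_partitionB _ (sorted_set_ne_nil _ hy)]
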